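-- pv_equiv track=rewrite | github.com/mcgov/yava | voynich.py | split_with_selector
-- ===== SOURCE A (Python) =====
-- def split_with_selector(line, include_dubious=False):
-- 	final = []
-- 	splat = line.split(".")
-- 	if include_dubious:
-- 		for item in splat:
-- 			for split_item in item.split(","):
-- 				final.append(split_item)
-- 	else:
-- 		for item in splat:
-- 			final.append(item.replace(",",""))
-- 	return final
-- ===== SOURCE B (Python) =====
-- def split_with_selector(line, include_dubious=False):
-- 	if include_dubious:
-- 		return line.replace(".", ",").split(",")
-- 	return line.replace(",", "").split(".")
-- ===== Notes on version B (the rewrite author's own statement) =====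
-- stated objective: simpler
-- what changed: Replaces the explicit append loops (a nested loop over per-item comma splits, or a loop stripping commas per item) with delimiter normalisation followed by one single split call.
import Mathlib
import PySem

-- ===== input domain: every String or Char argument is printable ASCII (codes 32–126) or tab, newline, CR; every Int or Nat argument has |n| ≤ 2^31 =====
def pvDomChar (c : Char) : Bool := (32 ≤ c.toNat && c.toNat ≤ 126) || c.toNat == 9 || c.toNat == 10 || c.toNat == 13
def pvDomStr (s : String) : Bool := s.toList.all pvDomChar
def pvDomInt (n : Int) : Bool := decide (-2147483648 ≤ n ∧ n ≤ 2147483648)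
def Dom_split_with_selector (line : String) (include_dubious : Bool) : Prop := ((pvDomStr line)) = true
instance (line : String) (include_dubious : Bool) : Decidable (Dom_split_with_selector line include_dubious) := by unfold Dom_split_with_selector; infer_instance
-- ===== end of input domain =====

-- B replaces A's explicit append loops by delimiter normalisation plus a single split (simpler).


-- ===== PORT A =====
-- strings are handled as char lists via PySem.Chars (exact on the ASCII domain); the final map
-- to String is the type-convention packaging of the produced pieces
def split_with_selector (line : String) (include_dubious : Bool) : List String :=
  let splat := PySem.Chars.splitOn line.toList ['.']
  if include_dubious then
    (splat.foldl (fun final item =>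
      (PySem.Chars.splitOn item [',']).foldl (fun f split_item => f ++ [split_item]) final) []).map String.ofList
  else
    (splat.foldl (fun final item => final ++ [PySem.Chars.replace item [','] []]) []).map String.ofList

-- ===== PORT B =====
def split_with_selector_alt (line : String) (include_dubious : Bool) : List String :=
  if include_dubious then
    (PySem.Chars.splitOn (PySem.Chars.replace line.toList ['.'] [',']) [',']).map String.ofList
  else
    (PySem.Chars.splitOn (PySem.Chars.replace line.toList [','] []) ['.']).map String.ofList

-- ===== PRECONDITION & SPEC =====
def Spec_split_with_selector (line : String) (include_dubious : Bool) (out : List String) : Prop := out = split_with_selector_alt line include_dubious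
instance (line : String) (include_dubious : Bool) (out : List String) : Decidable (Spec_split_with_selector line include_dubious out) := by unfold Spec_split_with_selector; infer_instance

-- ===== CLAIM (what is proved, stated in full; the proofs are below) =====
def Claim_equal_split_with_selector : Prop := ∀ (line : String) (include_dubious : Bool), Dom_split_with_selector line include_dubious → Spec_split_with_selector line include_dubious (split_with_selector line include_dubious)

-- ===== LEMMAS AND PROOFS =====

def sSplit (d : Char) : List Char → List (List Char)
  | [] => [[]]
  | c :: t => if c = d then [] :: sSplit d t else (sSplit d t).modifyHead (c :: ·)

def sRepl (o : Char) (new : List Char) : List Char → List Char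
  | [] => []
  | c :: t => if c = o then new ++ sRepl o new t else c :: sRepl o new t

theorem sSplit_ne_nil (d : Char) (l : List Char) : sSplit d l ≠ [] := by
  cases l with
  | nil => simp [sSplit]
  | cons c t =>
    simp only [sSplit]
    split_ifs
    · simp
    · intro hh
      rcases hx : sSplit d t with _ | ⟨a, r⟩
      · exact sSplit_ne_nil d t hx
      · rw [hx] at hh; simp [List.modifyHead] at hh

theorem splitOn_go_eq (d : Char) (fuel : Nat) (l cur : List Char) (accs : List (List Char))
    (h : l.length ≤ fuel) :
    PySem.Chars.splitOn.go [d] fuel l cur accs = accs.reverse ++ (sSplit d l).modifyHead (cur.reverse ++ ·) := by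
  induction l generalizing fuel cur accs with
  | nil => cases fuel <;> simp [PySem.Chars.splitOn.go, sSplit]
  | cons c t ih =>
    cases fuel with
    | zero => simp at h
    | succ fuel =>
      rw [PySem.Chars.splitOn.go]
      by_cases hc : c = d
      · subst hc
        rw [if_pos (by simp [List.isPrefixOf])]
        have hd : List.drop [c].length (c :: t) = t := rfl
        rw [hd, ih fuel [] _ (Nat.le_of_succ_le_succ (by simpa using h))]
        simp only [sSplit, if_pos rfl, List.reverse_cons, List.reverse_nil, List.nil_append,
          List.modifyHead, List.append_assoc, List.singleton_append]
        rcases sSplit c t with _ | ⟨a, r⟩ <;> simp [List.modifyHead]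
      · rw [if_neg (by simp [List.isPrefixOf]; intro hh; exact hc (by simpa [eq_comm] using hh))]
        rw [ih fuel (c :: cur) accs (Nat.le_of_succ_le_succ (by simpa using h))]
        simp only [sSplit, if_neg hc]
        rcases hs : sSplit d t with _ | ⟨a, r⟩
        · exact absurd hs (sSplit_ne_nil d t)
        · simp [List.modifyHead]

theorem splitOn_eq (d : Char) (l : List Char) :
    PySem.Chars.splitOn l [d] = sSplit d l := by
  rw [PySem.Chars.splitOn, splitOn_go_eq d _ l [] [] (by omega)]
  rcases hs : sSplit d l with _ | ⟨a, r⟩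
  · exact absurd hs (sSplit_ne_nil d l)
  · simp [List.modifyHead]

theorem replace_go_eq (o : Char) (new : List Char) (fuel : Nat) (l acc : List Char)
    (h : l.length ≤ fuel) :
    PySem.Chars.replace.go [o] new fuel l acc = acc.reverse ++ sRepl o new l := by
  induction l generalizing fuel acc with
  | nil => cases fuel <;> simp [PySem.Chars.replace.go, sRepl]
  | cons c t ih =>
    cases fuel with
    | zero => simp at h
    | succ fuel =>
      rw [PySem.Chars.replace.go]
      by_cases hc : c = o
      · subst hc
        rw [if_pos (by simp [List.isPrefixOf])]
        have hd : List.drop [c].length (c :: t) = t := rfl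
        rw [hd, ih fuel _ (Nat.le_of_succ_le_succ (by simpa using h))]
        simp [sRepl]
      · rw [if_neg (by simp [List.isPrefixOf]; intro hh; exact hc (by simpa [eq_comm] using hh))]
        rw [ih fuel _ (Nat.le_of_succ_le_succ (by simpa using h))]
        simp [sRepl, hc]

theorem replace_eq (o : Char) (new : List Char) (l : List Char) :
    PySem.Chars.replace l [o] new = sRepl o new l := by
  rw [PySem.Chars.replace]
  rw [if_neg (by simp)]
  exact replace_go_eq o new l.length l [] le_rfl

theorem dubious_core (l : List Char) :
    sSplit ',' (sRepl '.' [','] l) = (sSplit '.' l).flatMap (sSplit ',') := by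
  induction l with
  | nil => simp [sSplit, sRepl]
  | cons c t ih =>
    rcases hs : sSplit '.' t with _ | ⟨a, r⟩
    · exact absurd hs (sSplit_ne_nil '.' t)
    · by_cases hc : c = '.'
      · subst hc
        simp [sSplit, sRepl, ih]
      · by_cases hc2 : c = ','
        · subst hc2
          simp only [sRepl, if_neg hc, sSplit, if_pos rfl, ih, hs,
            List.modifyHead, List.flatMap_cons, List.cons_append]
          simp [sSplit]
        · simp only [sRepl, if_neg hc, sSplit, if_neg hc2, ih, hs,
            List.modifyHead, List.flatMap_cons]
          rcases ha : sSplit ',' a with _ | ⟨b, rb⟩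
          · exact absurd ha (sSplit_ne_nil ',' a)
          · simp [sSplit, if_neg hc2, ha, List.modifyHead]

theorem plain_core (l : List Char) :
    sSplit '.' (sRepl ',' [] l) = (sSplit '.' l).map (sRepl ',' []) := by
  induction l with
  | nil => simp [sSplit, sRepl]
  | cons c t ih =>
    rcases hs : sSplit '.' t with _ | ⟨a, r⟩
    · exact absurd hs (sSplit_ne_nil '.' t)
    · by_cases hc2 : c = ','
      · subst hc2
        have h1 : sRepl ',' [] (',' :: t) = sRepl ',' [] t := by simp [sRepl]
        have h2 : sSplit '.' (',' :: t) = (',' :: a) :: r := by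
          simp [sSplit, hs, List.modifyHead]
        rw [h1, ih, hs, h2, List.map_cons, List.map_cons]
        simp [sRepl]
      · by_cases hc : c = '.'
        · subst hc
          simp [sSplit, sRepl, ih, hs]
        · simp [sSplit, sRepl, if_neg hc, if_neg hc2, ih, hs, List.modifyHead]

theorem foldl_snoc {b : Type} (L : List b) (a : List b) :
    L.foldl (fun f x => f ++ [x]) a = a ++ L := by
  induction L generalizing a with
  | nil => simp
  | cons x t ih => simp [List.foldl, ih]

theorem foldl_app_singleton {b g : Type} (h : b → g) (L : List b) (a : List g) :
    L.foldl (fun f x => f ++ [h x]) a = a ++ L.map h := by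
  induction L generalizing a with
  | nil => simp
  | cons x t ih => simp [List.foldl, ih]

theorem foldl_inner_eq_flatMap (g : List Char → List (List Char)) (L : List (List Char)) (a : List (List Char)) :
    L.foldl (fun final item => (g item).foldl (fun f si => f ++ [si]) final) a = a ++ L.flatMap g := by
  induction L generalizing a with
  | nil => simp
  | cons x t ih => rw [List.foldl_cons, foldl_snoc, ih, List.flatMap_cons, List.append_assoc]

-- ===== VERDICT (by name: the statement is the Claim_ definition above) =====
theorem split_with_selector_spec : Claim_equal_split_with_selector := by
  intro line include_dubious _
  unfold Spec_split_with_selector split_with_selector split_with_selector_alt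
  cases include_dubious with
  | true =>
    simp only [if_true, splitOn_eq, replace_eq, foldl_inner_eq_flatMap, List.nil_append,
      dubious_core]
  | false =>
    simp only [Bool.false_eq_true, if_false, splitOn_eq, replace_eq, foldl_app_singleton,
      List.nil_append, plain_core, List.map_map]
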